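-- pv_equiv track=rewrite | github.com/pypi-data/pypi-mirror-380 | packages/ggnes/ggnes-0.1.2-py3-none-any.whl/ggnes/evolution/islands.py | plan_batches
-- ===== SOURCE A (Python) =====
-- from collections.abc import Iterable
-- from typing import Any
--
-- def plan_batches(items: Iterable[Any], max_items_per_batch: int) -> list[list[Any]]:
--     """Plan deterministic batches with a hard item budget per batch.
--
--     Splits `items` into chunks of size <= max_items_per_batch, preserving order.
--     If `max_items_per_batch` <= 0, returns a single empty batch.
--     """
--     max_n = int(max_items_per_batch)
--     seq = list(items)
--     if max_n <= 0:
--         return [[]]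
--     batches: list[list[Any]] = []
--     for i in range(0, len(seq), max_n):
--         batches.append(seq[i : i + max_n])
--     return batches
-- ===== SOURCE B (Python) =====
-- def plan_batches(items, max_items_per_batch):
--     """Split items into ordered batches of at most max_items_per_batch each."""
--     max_n = int(max_items_per_batch)
--     if max_n <= 0:
--         return [[]]
--     batches = []
--     current = []
--     for item in items:
--         current.append(item)
--         if len(current) == max_n:
--             batches.append(current)
--             current = []
--     if current:
--         batches.append(current)
--     return batches
-- ===== Notes on version B (the rewrite author's own statement) =====
-- stated objective: alternative
-- what changed: B replaces A's strided-index range loop with slicing by a single element-by-element pass that maintains a running buffer, flushing it each time it reaches max_n and once more at the end if non-empty.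
import Mathlib
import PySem

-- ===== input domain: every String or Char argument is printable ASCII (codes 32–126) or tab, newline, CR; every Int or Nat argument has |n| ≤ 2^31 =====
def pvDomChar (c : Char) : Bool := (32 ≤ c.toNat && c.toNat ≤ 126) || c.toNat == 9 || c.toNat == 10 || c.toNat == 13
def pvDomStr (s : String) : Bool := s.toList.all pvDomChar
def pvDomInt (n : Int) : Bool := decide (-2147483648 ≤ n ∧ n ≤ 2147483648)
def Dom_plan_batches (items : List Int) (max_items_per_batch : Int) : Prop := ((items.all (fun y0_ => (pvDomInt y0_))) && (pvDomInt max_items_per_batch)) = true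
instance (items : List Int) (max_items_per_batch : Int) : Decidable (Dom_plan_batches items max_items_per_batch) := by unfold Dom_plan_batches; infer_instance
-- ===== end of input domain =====

-- B replaces A's strided-index range loop with slicing by a single element-by-element
-- pass maintaining a running buffer (objective: alternative decomposition, same cost).

-- ===== PORT A =====
-- literal port of A: range(0, len(seq), max_n) with seq[i : i + max_n] slices
def plan_batches (items : List Int) (max_items_per_batch : Int) : List (List Int) :=
  let max_n := max_items_per_batch
  let seq := items
  if max_n ≤ 0 then [[]]
  else
    (PySem.List.pyRange 0 (seq.length : Int) max_n).foldl
      (fun batches i => batches ++ [PySem.List.slice seq (some i) (some (i + max_n))]) []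

-- ===== PORT B =====
-- B's loop: append each item to `current`, flush when full, flush trailing non-empty buffer
def planBatchesAltGo (max_n : Int) : List Int → List Int → List (List Int) → List (List Int)
  | [], current, batches => if current.isEmpty then batches else batches ++ [current]
  | x :: xs, current, batches =>
    let current' := current ++ [x]
    if (current'.length : Int) = max_n then planBatchesAltGo max_n xs [] (batches ++ [current'])
    else planBatchesAltGo max_n xs current' batches

def plan_batches_alt (items : List Int) (max_items_per_batch : Int) : List (List Int) :=
  let max_n := max_items_per_batch
  if max_n ≤ 0 then [[]]
  else planBatchesAltGo max_n items [] []

-- ===== PRECONDITION & SPEC =====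
def Spec_plan_batches (items : List Int) (max_items_per_batch : Int) (out : List (List Int)) : Prop := out = plan_batches_alt items max_items_per_batch
instance (items : List Int) (max_items_per_batch : Int) (out : List (List Int)) : Decidable (Spec_plan_batches items max_items_per_batch out) := by unfold Spec_plan_batches; infer_instance

-- ===== CLAIM (what is proved, stated in full; the proofs are below) =====
def Claim_equal_plan_batches : Prop := ∀ (items : List Int) (max_items_per_batch : Int), Dom_plan_batches items max_items_per_batch → Spec_plan_batches items max_items_per_batch (plan_batches items max_items_per_batch)

-- ===== LEMMAS AND PROOFS =====

-- the common reference value: chunks of size k+1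
def chunksA (k : Nat) : List Int → List (List Int)
  | [] => []
  | x :: xs => (x :: List.take k xs) :: chunksA k (List.drop k xs)
termination_by l => l.length
decreasing_by simp only [List.length_drop, List.length_cons]; omega

lemma chunksA_nil (k : Nat) : chunksA k [] = [] := by rw [chunksA.eq_def]

lemma chunksA_cons (k : Nat) (x : Int) (xs : List Int) :
    chunksA k (x :: xs) = (x :: List.take k xs) :: chunksA k (List.drop k xs) := by
  rw [chunksA.eq_def]

lemma ediv_count (d s : Int) (hs : 0 < s) :
    (d + s - 1) / s = (d - 1) / s + 1 := by
  have : d + s - 1 = (d - 1) + 1 * s := by ring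
  rw [this, Int.add_mul_ediv_right _ _ (by omega : s ≠ 0)]

lemma pyRange_pos_cons (a b s : Int) (hs : 0 < s) (hab : a < b) :
    PySem.List.pyRange a b s = a :: PySem.List.pyRange (a + s) b s := by
  rw [PySem.List.pyRange_of_pos a b hs, PySem.List.pyRange_of_pos (a + s) b hs]
  have hq0 : 0 ≤ (b - a - 1) / s := Int.ediv_nonneg (by omega) (by omega)
  have hcnt : (b - a + s - 1) / s = (b - a - 1) / s + 1 := by
    have := ediv_count (b - a) s hs; simpa using this
  by_cases hb : a + s < b
  · have h1 : (if a < b then ((b - a + s - 1) / s).toNat else 0)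
        = ((b - (a + s) + s - 1) / s).toNat + 1 := by
      rw [if_pos hab]
      have : b - (a + s) + s - 1 = b - a - 1 := by ring
      rw [this, hcnt]; omega
    rw [h1, if_pos hb, List.range_succ_eq_map, List.map_cons, List.map_map]
    congr 1
    · simp
    · apply List.map_congr_left; intro y _; simp [Function.comp]; ring
  · have hz : (b - a - 1) / s = 0 := Int.ediv_eq_zero_of_lt (by omega) (by omega)
    have h1 : (if a < b then ((b - a + s - 1) / s).toNat else 0) = 1 := by
      rw [if_pos hab, hcnt, hz]; rfl
    rw [h1, if_neg hb]
    simp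

lemma pyRange_shift (a b c s : Int) (hs : 0 < s) :
    PySem.List.pyRange (a + c) (b + c) s = (PySem.List.pyRange a b s).map (· + c) := by
  rw [PySem.List.pyRange_of_pos _ _ hs, PySem.List.pyRange_of_pos _ _ hs, List.map_map]
  have h1 : b + c - (a + c) = b - a := by ring
  have h2 : (a + c < b + c) ↔ (a < b) := by omega
  simp only [h1, h2]
  apply List.map_congr_left; intro x _; simp [Function.comp]; ring

lemma pyRange_pos_nil (a b s : Int) (hs : 0 < s) (h : b ≤ a) :
    PySem.List.pyRange a b s = [] := by
  rw [PySem.List.pyRange_of_pos _ _ hs, if_neg (by omega)]; rfl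

lemma mem_pyRange_pos_nonneg {b s x : Int} (hs : 0 < s)
    (hx : x ∈ PySem.List.pyRange 0 b s) : 0 ≤ x := by
  rw [PySem.List.pyRange_of_pos _ _ hs] at hx
  obtain ⟨k, _, rfl⟩ := List.mem_map.mp hx
  positivity

lemma foldA (k : Nat) : ∀ (xs : List Int) (acc : List (List Int)),
    (PySem.List.pyRange 0 (xs.length : Int) ((k : Int) + 1)).foldl
      (fun batches i => batches ++ [PySem.List.slice xs (some i) (some (i + ((k : Int) + 1)))]) acc
    = acc ++ chunksA k xs := by
  have hs : (0 : Int) < (k : Int) + 1 := by positivity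
  suffices H : ∀ n (xs : List Int), xs.length = n → ∀ acc,
      (PySem.List.pyRange 0 (xs.length : Int) ((k : Int) + 1)).foldl
        (fun batches i => batches ++ [PySem.List.slice xs (some i) (some (i + ((k : Int) + 1)))]) acc
      = acc ++ chunksA k xs by
    intro xs acc; exact H xs.length xs rfl acc
  intro n
  induction n using Nat.strong_induction_on with
  | _ n ih =>
    intro xs hlen acc
    match xs with
    | [] => simp [pyRange_pos_nil 0 0 _ hs le_rfl, chunksA_nil]
    | x :: rest =>
      have hpos : (0 : Int) < ((x :: rest).length : Int) := by rw [List.length_cons]; push_cast; omega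
      rw [pyRange_pos_cons 0 _ _ hs hpos, List.foldl_cons]
      have hslice : PySem.List.slice (x :: rest) (some 0) (some (0 + ((k : Int) + 1)))
          = x :: List.take k rest := by
        have h01 : (0 : Int) + ((k : Int) + 1) = ((k + 1 : Nat) : Int) := by push_cast; ring
        rw [h01]
        rw [show (some (0 : Int)) = some ((0 : Nat) : Int) from rfl]
        rw [PySem.List.slice_natCast]
        simp
      rw [hslice]
      set t := List.drop k rest with ht
      have hrange : PySem.List.pyRange ((k : Int) + 1) ((x :: rest).length : Int) ((k : Int) + 1)
          = (PySem.List.pyRange 0 (t.length : Int) ((k : Int) + 1)).map (· + ((k : Int) + 1)) := by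
        by_cases hge : k ≤ rest.length
        · have hlen2 : (t.length : Int) + ((k : Int) + 1) = ((x :: rest).length : Int) := by
            rw [ht, List.length_drop, List.length_cons]; push_cast; omega
          have h2 := pyRange_shift 0 (t.length : Int) ((k : Int) + 1) ((k : Int) + 1) hs
          rw [zero_add, hlen2] at h2
          exact h2
        · have h1 : t.length = 0 := by rw [ht, List.length_drop]; omega
          rw [h1, Nat.cast_zero]
          rw [pyRange_pos_nil ((k : Int) + 1) ((x :: rest).length : Int) _ hs
            (by rw [List.length_cons]; push_cast; omega)]
          rw [pyRange_pos_nil 0 0 _ hs le_rfl]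
          rfl
      rw [zero_add, hrange, List.foldl_map]
      have hcong : (PySem.List.pyRange 0 (t.length : Int) ((k : Int) + 1)).foldl
          (fun batches i => batches ++ [PySem.List.slice (x :: rest) (some (i + ((k : Int) + 1)))
            (some (i + ((k : Int) + 1) + ((k : Int) + 1)))]) (acc ++ [x :: List.take k rest])
          = (PySem.List.pyRange 0 (t.length : Int) ((k : Int) + 1)).foldl
          (fun batches i => batches ++ [PySem.List.slice t (some i) (some (i + ((k : Int) + 1)))])
            (acc ++ [x :: List.take k rest]) := by
        apply PySem.List.foldl_congr_mem
        intro b i hi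
        have hi0 : 0 ≤ i := mem_pyRange_pos_nonneg hs hi
        have e1 : PySem.List.slice (x :: rest) (some (i + ((k : Int) + 1)))
            (some (i + ((k : Int) + 1) + ((k : Int) + 1)))
            = (List.drop (i + ((k : Int) + 1)).toNat (x :: rest)).take
                ((i + ((k : Int) + 1) + ((k : Int) + 1)).toNat - (i + ((k : Int) + 1)).toNat) :=
          PySem.List.slice_toNat _ (by omega) (by omega)
        have e2 : PySem.List.slice t (some i) (some (i + ((k : Int) + 1)))
            = (List.drop i.toNat t).take ((i + ((k : Int) + 1)).toNat - i.toNat) :=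
          PySem.List.slice_toNat _ (by omega) (by omega)
        rw [e1, e2]
        have e3 : List.drop i.toNat t = List.drop (i + ((k : Int) + 1)).toNat (x :: rest) := by
          rw [ht, List.drop_drop,
            show (i + ((k : Int) + 1)).toNat = k + i.toNat + 1 from by omega,
            List.drop_succ_cons]
        have hn1 : (i + ((k : Int) + 1) + ((k : Int) + 1)).toNat - (i + ((k : Int) + 1)).toNat
            = k + 1 := by omega
        have hn2 : (i + ((k : Int) + 1)).toNat - i.toNat = k + 1 := by omega
        rw [e3, hn1, hn2]
      rw [hcong]
      have hlt : t.length < n := by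
        rw [ht, List.length_drop]
        rw [List.length_cons] at hlen
        omega
      rw [ih t.length hlt t rfl (acc ++ [x :: List.take k rest])]
      show _ = acc ++ chunksA k (x :: rest)
      rw [chunksA_cons]
      simp [ht]

lemma altGo_eq (k : Nat) : ∀ (xs cur : List Int) (acc : List (List Int)),
    cur.length ≤ k →
    planBatchesAltGo ((k : Int) + 1) xs cur acc = acc ++ chunksA k (cur ++ xs) := by
  intro xs
  induction xs with
  | nil =>
    intro cur acc hcur
    match cur with
    | [] => simp [planBatchesAltGo, chunksA_nil]
    | c :: cs =>
      have h1 : List.take k cs = cs := List.take_of_length_le (by simp at hcur; omega)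
      have h2 : List.drop k cs = [] := List.drop_of_length_le (by simp at hcur; omega)
      simp [planBatchesAltGo, chunksA_cons, chunksA_nil, h1, h2]
  | cons x xs ihx =>
    intro cur acc hcur
    rw [planBatchesAltGo]
    by_cases hfull : ((cur ++ [x]).length : Int) = (k : Int) + 1
    · rw [if_pos hfull]
      rw [ihx [] (acc ++ [cur ++ [x]]) (by simp)]
      have hck : cur.length = k := by simp at hfull; omega
      have hchunk : chunksA k (cur ++ x :: xs) = (cur ++ [x]) :: chunksA k xs := by
        match cur, hck with
        | [], hck =>
          simp at hck
          simp [chunksA_cons, ← hck]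
        | c :: cs, hck =>
          rw [List.cons_append, chunksA_cons]
          simp at hck
          have ht : List.take k (cs ++ x :: xs) = cs ++ [x] := by
            rw [List.take_append,
              List.take_of_length_le (by omega), show k - cs.length = 1 by omega]
            rfl
          have hd : List.drop k (cs ++ x :: xs) = xs := by
            rw [List.drop_append,
              List.drop_of_length_le (by omega), show k - cs.length = 1 by omega]
            rfl
          rw [ht, hd]
          simp
      rw [hchunk]
      simp
    · rw [if_neg hfull]
      have hlen : (cur ++ [x]).length ≤ k := by
        simp at hfull ⊢; omega
      rw [ihx (cur ++ [x]) acc hlen]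
      simp

-- ===== VERDICT (by name: the statement is the Claim_ definition above) =====
theorem plan_batches_spec : Claim_equal_plan_batches := by
  intro items m _
  unfold Spec_plan_batches plan_batches plan_batches_alt
  by_cases hm : m ≤ 0
  · simp [hm]
  · have hm' : 0 < m := by omega
    obtain ⟨k, hk⟩ : ∃ k : Nat, m = (k : Int) + 1 := ⟨(m - 1).toNat, by omega⟩
    subst hk
    simp only [hm, if_false]
    rw [foldA k items [], altGo_eq k items [] [] (by simp)]
    simp
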